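-- pv_equiv track=rewrite | github.com/lee-jae-o/PythonStudy | study/study91.py | count_attractions
-- ===== SOURCE A (Python) =====
-- def count_attractions(children_heights, attractions):
--     attraction_counts = [0] * len(attractions)
--
--     for child_height in children_heights:
--         for i, attraction in enumerate(attractions):
--             min_height, max_height = attraction
--             if min_height <= child_height <= max_height:
--                 attraction_counts[i] += 1
--
--     max_attractions = max(attraction_counts)
--     return max_attractions
-- ===== SOURCE B (Python) =====
-- def count_attractions(children_heights, attractions):
--     # Sort once, then count each attraction's range with two binary searches:
--     # O((C + A) log C) instead of A's O(C * A) nested scans.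
--     hs = sorted(children_heights)
--     n = len(hs)
--
--     def bisect_left(x):  # first index i with hs[i] >= x (bisect re-written: A imports nothing)
--         lo, hi = 0, n
--         while lo < hi:
--             mid = (lo + hi) // 2
--             if hs[mid] < x:
--                 lo = mid + 1
--             else:
--                 hi = mid
--         return lo
--
--     def bisect_right(x):  # first index i with hs[i] > x
--         lo, hi = 0, n
--         while lo < hi:
--             mid = (lo + hi) // 2
--             if x < hs[mid]:
--                 hi = mid
--             else:
--                 lo = mid + 1
--         return lo
--
--     return max(
--         bisect_right(mx) - bisect_left(mn) if mn <= mx else 0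
--         for mn, mx in attractions
--     )
-- ===== Notes on version B (the rewrite author's own statement) =====
-- stated objective: faster
-- what changed: B sorts the children's heights once and counts each attraction's eligible children with two binary searches (bisect_left/bisect_right) instead of A's per-child inner scan over all attractions.
import Mathlib
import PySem

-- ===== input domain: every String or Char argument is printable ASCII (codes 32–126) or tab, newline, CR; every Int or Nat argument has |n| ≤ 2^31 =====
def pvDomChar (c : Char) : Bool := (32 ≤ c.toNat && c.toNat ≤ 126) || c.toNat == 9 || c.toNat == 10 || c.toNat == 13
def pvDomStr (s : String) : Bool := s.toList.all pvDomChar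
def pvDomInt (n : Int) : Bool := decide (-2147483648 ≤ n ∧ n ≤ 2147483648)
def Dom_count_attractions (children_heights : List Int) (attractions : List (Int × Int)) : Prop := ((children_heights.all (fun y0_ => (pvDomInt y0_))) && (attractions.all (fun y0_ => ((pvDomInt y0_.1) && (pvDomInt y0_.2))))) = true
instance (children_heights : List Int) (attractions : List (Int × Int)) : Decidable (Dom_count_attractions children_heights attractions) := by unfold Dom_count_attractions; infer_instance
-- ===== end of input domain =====

-- B sorts the children's heights once, then counts each attraction's range with two
-- binary searches (O((C+A) log C)) instead of A's per-child scan over all attractions (O(C*A)).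
-- Same return value everywhere both return; both raise ValueError on empty `attractions` (excluded by Pre_).

-- ===== PORT A =====
-- inner 'for i, attraction in enumerate(attractions)' loop, one step per attraction;
-- counts[i] += 1 becomes set i (getD i 0 + 1); i is always < counts.length, so getD is exact.
def pvInnerA (child : Int) (counts : List Int) (i : Nat) : List (Int × Int) → List Int
  | [] => counts
  | (mn, mx) :: rest =>
      pvInnerA child
        (if mn ≤ child ∧ child ≤ mx then counts.set i (counts.getD i 0 + 1) else counts)
        (i + 1) rest

def count_attractions (children_heights : List Int) (attractions : List (Int × Int)) : Int :=
  let init := List.replicate attractions.length (0 : Int)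
  let counts := children_heights.foldl (fun acc ch => pvInnerA ch acc 0 attractions) init
  -- max(attraction_counts): raises ValueError when attractions = [] (excluded by Pre_); getD 0 is unreachable there
  (PySem.List.max? counts (fun x => x)).getD 0

-- ===== PORT B =====
def count_attractions_alt (children_heights : List Int) (attractions : List (Int × Int)) : Int :=
  let hs := PySem.List.sorted children_heights (fun x => x) false
  -- Source B's hand-written bisect loops are literally PySem.List.bisectLeftLoop / bisectRightLoop
  let counts := attractions.map (fun a =>
    if a.1 ≤ a.2 then
      ((PySem.List.bisectRight hs a.2 : Int) - (PySem.List.bisectLeft hs a.1 : Int))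
    else 0)
  -- max(generator): raises ValueError when attractions = [] (excluded by Pre_); getD 0 unreachable there
  (PySem.List.max? counts (fun x => x)).getD 0

-- ===== PRECONDITION & SPEC =====
-- Pre_ excludes exactly attractions = [], where both A and B raise ValueError (max of an empty sequence).
def Pre_count_attractions (children_heights : List Int) (attractions : List (Int × Int)) : Prop :=
  attractions ≠ []
instance (children_heights : List Int) (attractions : List (Int × Int)) : Decidable (Pre_count_attractions children_heights attractions) := by unfold Pre_count_attractions; infer_instance

def pvWitness_count_attractions : List Int × (List (Int × Int)) := ([120, 140, 105], [(100, 130), (110, 150)])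

def Spec_count_attractions (children_heights : List Int) (attractions : List (Int × Int)) (out : Int) : Prop := out = count_attractions_alt children_heights attractions
instance (children_heights : List Int) (attractions : List (Int × Int)) (out : Int) : Decidable (Spec_count_attractions children_heights attractions out) := by unfold Spec_count_attractions; infer_instance

-- ===== CLAIM (what is proved, stated in full; the proofs are below) =====
def Claim_equal_count_attractions : Prop := ∀ (children_heights : List Int) (attractions : List (Int × Int)), Dom_count_attractions children_heights attractions → Pre_count_attractions children_heights attractions → Spec_count_attractions children_heights attractions (count_attractions children_heights attractions)

-- ===== LEMMAS AND PROOFS =====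

-- the per-attraction count both programs compute
def pvCnt (children : List Int) (a : Int × Int) : Int :=
  (children.countP (fun h => decide (a.1 ≤ h ∧ h ≤ a.2)) : Int)

-- setting the element right after a prefix
theorem pv_set_after (pre : List Int) (t : Int) (ts : List Int) (w : Int) :
    (pre ++ t :: ts).set pre.length w = pre ++ w :: ts := by
  induction pre with
  | nil => simp
  | cons x xs ih => simp [List.set, ih]

theorem pv_getD_after (pre : List Int) (t : Int) (ts : List Int) :
    (pre ++ t :: ts).getD pre.length 0 = t := by
  induction pre with
  | nil => simp
  | cons x xs ih => simpa using ih

-- the inner loop adds 1 at each attraction containing the child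
theorem pv_inner (ch : Int) : ∀ (attrs : List (Int × Int)) (pre tail : List Int),
    tail.length = attrs.length →
    pvInnerA ch (pre ++ tail) pre.length attrs =
      pre ++ List.zipWith (fun (a : Int × Int) c => if a.1 ≤ ch ∧ ch ≤ a.2 then c + 1 else c) attrs tail := by
  intro attrs
  induction attrs with
  | nil =>
      intro pre tail hlen
      simp at hlen
      simp [pvInnerA, hlen]
  | cons a rest ih =>
      intro pre tail hlen
      obtain ⟨t, ts, rfl⟩ : ∃ t ts, tail = t :: ts := by
        cases tail with
        | nil => simp at hlen
        | cons t ts => exact ⟨t, ts, rfl⟩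
      obtain ⟨mn, mx⟩ := a
      simp only [pvInnerA]
      have hset : (if mn ≤ ch ∧ ch ≤ mx then
          (pre ++ t :: ts).set pre.length ((pre ++ t :: ts).getD pre.length 0 + 1)
        else pre ++ t :: ts) = pre ++ (if mn ≤ ch ∧ ch ≤ mx then t + 1 else t) :: ts := by
        split_ifs with h
        · rw [pv_getD_after, pv_set_after]
        · rfl
      rw [hset]
      have hlen' : ts.length = rest.length := by simpa using hlen
      have := ih (pre ++ [if mn ≤ ch ∧ ch ≤ mx then t + 1 else t]) ts hlen'
      simp only [List.length_append, List.length_cons, List.length_nil] at this ⊢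
      simpa [List.append_assoc, List.zipWith] using this

-- one child processed over a counts list of shape map g
theorem pv_inner_map (ch : Int) (attrs : List (Int × Int)) (g : (Int × Int) → Int) :
    pvInnerA ch (attrs.map g) 0 attrs =
      attrs.map (fun a => if a.1 ≤ ch ∧ ch ≤ a.2 then g a + 1 else g a) := by
  have h := pv_inner ch attrs [] (attrs.map g) (by simp)
  simp only [List.nil_append, List.length_nil] at h
  rw [h, List.zipWith_map_right, List.zipWith_self]

-- the outer loop yields the per-attraction counts
theorem pv_outer (attrs : List (Int × Int)) : ∀ (children : List Int) (g : (Int × Int) → Int),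
    children.foldl (fun acc ch => pvInnerA ch acc 0 attrs) (attrs.map g) =
      attrs.map (fun a => g a + pvCnt children a) := by
  intro children
  induction children with
  | nil =>
      intro g
      simp [pvCnt, List.countP_nil]
  | cons ch rest ih =>
      intro g
      simp only [List.foldl_cons]
      rw [pv_inner_map, ih]
      apply List.map_congr_left
      intro a _
      simp only [pvCnt, List.countP_cons]
      by_cases h : a.1 ≤ ch ∧ ch ≤ a.2
      · simp [h]; push_cast; ring
      · simp [h]

-- A's counts list is the per-attraction count map
theorem pv_A_counts (children : List Int) (attrs : List (Int × Int)) :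
    children.foldl (fun acc ch => pvInnerA ch acc 0 attrs) (List.replicate attrs.length (0 : Int)) =
      attrs.map (pvCnt children) := by
  have h0 : List.replicate attrs.length (0 : Int) = attrs.map (fun _ => 0) := by
    simp [List.map_const']
  rw [h0, pv_outer]
  simp

-- B's binary-search difference equals the count, on the sorted list
theorem pv_bisect_count (hs : List Int) (hsorted : hs.Pairwise (· ≤ ·)) (mn mx : Int) (hle : mn ≤ mx) :
    ((PySem.List.bisectRight hs mx : Int) - (PySem.List.bisectLeft hs mn : Int)) =
      (hs.countP (fun h => decide (mn ≤ h ∧ h ≤ mx)) : Int) := by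
  obtain ⟨hR_le, hR_lo, hR_hi⟩ := PySem.List.bisectRight_spec hs mx hsorted
  obtain ⟨hL_le, hL_lo, hL_hi⟩ := PySem.List.bisectLeft_spec hs mn hsorted
  set L := PySem.List.bisectLeft hs mn with hL
  set R := PySem.List.bisectRight hs mx with hR
  have hLR : L ≤ R := by
    by_contra hc
    push_neg at hc
    have hRlen : R < hs.length := lt_of_lt_of_le hc hL_le
    have h1 : hs[R] < mn := hL_lo R hRlen hc
    have h2 : mx < hs[R] := hR_hi R hRlen le_rfl
    omega
  -- split hs = take L ++ (middle) ++ drop R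
  have hsplit : hs.countP (fun h => decide (mn ≤ h ∧ h ≤ mx)) = R - L := by
    have hdecomp : hs = hs.take R ++ hs.drop R := (List.take_append_drop R hs).symm
    have hmid : hs.take R = hs.take L ++ (hs.take R).drop L := by
      have : (hs.take R).take L = hs.take L := by
        rw [List.take_take, min_eq_left hLR]
      rw [← this, List.take_append_drop]
    have c1 : (hs.take L).countP (fun h => decide (mn ≤ h ∧ h ≤ mx)) = 0 := by
      rw [List.countP_eq_zero]
      intro x hx
      obtain ⟨i, hi, rfl⟩ := List.mem_iff_getElem.1 hx
      have hi' : i < L ∧ i < hs.length := by simpa [List.length_take] using hi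
      have hilen : i < hs.length := hi'.2
      have hiL : i < L := hi'.1
      have := hL_lo i hilen hiL
      simp only [List.getElem_take]
      simp; omega
    have c3 : (hs.drop R).countP (fun h => decide (mn ≤ h ∧ h ≤ mx)) = 0 := by
      rw [List.countP_eq_zero]
      intro x hx
      obtain ⟨i, hi, rfl⟩ := List.mem_iff_getElem.1 hx
      have hilen : R + i < hs.length := by
        have := hi; simp [List.length_drop] at this; omega
      have := hR_hi (R + i) hilen (by omega)
      simp only [List.getElem_drop]
      simp; omega
    have c2 : ((hs.take R).drop L).countP (fun h => decide (mn ≤ h ∧ h ≤ mx)) = R - L := by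
      have hlen2 : ((hs.take R).drop L).length = R - L := by
        simp [List.length_drop, List.length_take]
        omega
      rw [← hlen2, List.countP_eq_length]
      intro x hx
      obtain ⟨i, hi, rfl⟩ := List.mem_iff_getElem.1 hx
      have hiRL : i < R - L := by rwa [hlen2] at hi
      have hidx : L + i < hs.length := by
        have hRlen : R ≤ hs.length := hR_le
        omega
      have hget : ((hs.take R).drop L)[i] = hs[L + i] := by
        simp [List.getElem_drop, List.getElem_take]
      rw [hget]
      have h1 : mn ≤ hs[L + i] := hL_hi (L + i) hidx (by omega)
      have h2 : hs[L + i] ≤ mx := hR_lo (L + i) hidx (by omega)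
      simp; omega
    calc hs.countP (fun h => decide (mn ≤ h ∧ h ≤ mx))
        = (hs.take R).countP _ + (hs.drop R).countP _ := by
          conv_lhs => rw [hdecomp]
          rw [List.countP_append]
      _ = R - L := by
          rw [hmid, List.countP_append, c1, c2, c3]
          omega
  rw [hsplit]
  push_cast [Nat.cast_sub hLR]
  ring

-- B's counts list is the same per-attraction count map
theorem pv_B_counts (children : List Int) (attrs : List (Int × Int)) :
    attrs.map (fun a =>
      if a.1 ≤ a.2 then
        ((PySem.List.bisectRight (PySem.List.sorted children (fun x => x) false) a.2 : Int)
          - (PySem.List.bisectLeft (PySem.List.sorted children (fun x => x) false) a.1 : Int))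
      else 0) = attrs.map (pvCnt children) := by
  apply List.map_congr_left
  intro a _
  set hs := PySem.List.sorted children (fun x => x) false with hhs
  have hperm : hs.Perm children := PySem.List.sorted_perm children (fun x => x) false
  have hsorted : hs.Pairwise (· ≤ ·) := by
    have := PySem.List.sorted_pairwise children (fun x => x)
    simpa [hhs] using this
  by_cases hle : a.1 ≤ a.2
  · rw [if_pos hle, pv_bisect_count hs hsorted a.1 a.2 hle, pvCnt,
      hperm.countP_eq]
  · have h0 : children.countP (fun h => decide (a.1 ≤ h ∧ h ≤ a.2)) = 0 := by
      rw [List.countP_eq_zero]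
      intro x _
      simp; omega
    rw [if_neg hle, pvCnt, h0]
    simp

-- ===== VERDICT (by name: the statement is the Claim_ definition above) =====
theorem count_attractions_spec : Claim_equal_count_attractions := by
  intro children attrs _ _
  unfold Spec_count_attractions
  simp only [count_attractions, count_attractions_alt]
  rw [pv_A_counts, pv_B_counts]
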